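-- pv_equiv track=rewrite | github.com/adampolak/first-fit | runs/results_numcolors/gen_108/original.py | _interleave_blocks
-- ===== SOURCE A (Python) =====
-- def _interleave_blocks(blocks, round_idx, interleave=True):
--     """
--     Interleave blocks in a round-robin fashion to maximize cross-block overlap.
--     If interleave is False, concatenate blocks in order.
--     The visitation order is alternated every round to reduce predictable reuse.
--     """
--     if not interleave:
--         S = []
--         for blk in blocks:
--             S.extend(blk)
--         return S
--
--     maxlen = max((len(b) for b in blocks), default=0)
--     order = list(range(len(blocks)))
--     if round_idx % 2 == 1:
--         order = order[::-1]
--     S = []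
--     for i in range(maxlen):
--         for idx in order:
--             blk = blocks[idx]
--             if i < len(blk):
--                 S.append(blk[i])
--     return S
-- ===== SOURCE B (Python) =====
-- def _interleave_blocks(blocks, round_idx, interleave=True):
--     """Row-major scatter into per-column buckets, then concatenate the
--     buckets: one pass over the elements instead of scanning every block
--     for every column index."""
--     if not interleave:
--         out = []
--         for blk in blocks:
--             out += blk
--         return out
--     seq = blocks if round_idx % 2 == 0 else blocks[::-1]
--     buckets = []
--     for blk in seq:
--         if len(blk) > len(buckets):
--             buckets.extend([] for _ in range(len(blk) - len(buckets)))
--         for col, v in zip(buckets, blk):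
--             col.append(v)
--     out = []
--     for col in buckets:
--         out += col
--     return out
-- ===== Notes on version B (the rewrite author's own statement) =====
-- stated objective: faster
-- what changed: A scans every block once per column index (nested column-major loops over range(maxlen) x all blocks); B makes a single row-major pass scattering each block's elements into per-column buckets and concatenates the buckets.
import Mathlib
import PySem

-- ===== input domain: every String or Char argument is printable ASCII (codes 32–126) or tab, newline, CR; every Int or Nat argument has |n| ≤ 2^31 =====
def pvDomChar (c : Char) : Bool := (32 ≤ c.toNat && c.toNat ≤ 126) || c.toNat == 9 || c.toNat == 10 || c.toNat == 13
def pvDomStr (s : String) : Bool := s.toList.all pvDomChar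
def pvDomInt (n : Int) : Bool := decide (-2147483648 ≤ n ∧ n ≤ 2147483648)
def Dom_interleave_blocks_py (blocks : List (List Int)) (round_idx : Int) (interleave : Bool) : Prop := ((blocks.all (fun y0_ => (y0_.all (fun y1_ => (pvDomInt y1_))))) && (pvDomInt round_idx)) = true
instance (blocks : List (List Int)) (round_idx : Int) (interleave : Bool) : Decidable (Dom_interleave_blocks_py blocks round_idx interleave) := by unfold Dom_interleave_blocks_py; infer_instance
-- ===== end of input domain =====

-- B replaces A's column-major scan of every block per column by a single row-major
-- scatter of each block into per-column buckets that are then concatenated (objective: faster).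

-- ===== PORT A =====
def interleave_blocks_py (blocks : List (List Int)) (round_idx : Int) (interleave : Bool) : List Int :=
  if interleave = false then
    -- S = []; for blk in blocks: S.extend(blk)
    blocks.foldl (fun S blk => S ++ blk) []
  else
    -- maxlen = max((len(b) for b in blocks), default=0)
    let maxlen : Int := (PySem.List.max? (blocks.map (fun b => (b.length : Int))) (fun x => x)).getD 0
    -- order = list(range(len(blocks))); reversed when round_idx % 2 == 1 ([ ::-1] is exactly reversal)
    let order : List Int :=
      if PySem.Int.mod round_idx 2 = 1 then (PySem.List.pyRange 0 (blocks.length : Int) 1).reverse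
      else PySem.List.pyRange 0 (blocks.length : Int) 1
    -- for i in range(maxlen): for idx in order: blk = blocks[idx]; if i < len(blk): S.append(blk[i])
    -- (idx is always in range and blk[i] only read under the guard, so pyGetD with a default is exact here)
    (PySem.List.pyRange 0 maxlen 1).foldl (fun S i =>
      order.foldl (fun S idx =>
        let blk := PySem.List.pyGetD blocks idx []
        if i < (blk.length : Int) then S ++ [PySem.List.pyGetD blk i 0] else S) S) []

-- ===== PORT B =====
-- one block scattered into the buckets: extend with empty buckets, then
-- 'for col, v in zip(buckets, blk): col.append(v)' (in-place appends = rebuild of the touched prefix)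
def pvScatter (buckets : List (List Int)) (blk : List Int) : List (List Int) :=
  let ext := buckets ++ List.replicate (blk.length - buckets.length) ([] : List Int)
  List.zipWith (fun col v => col ++ [v]) ext blk ++ ext.drop blk.length

def interleave_blocks_py_alt (blocks : List (List Int)) (round_idx : Int) (interleave : Bool) : List Int :=
  if interleave = false then
    blocks.foldl (fun out blk => out ++ blk) []
  else
    let seq := if PySem.Int.mod round_idx 2 = 0 then blocks else blocks.reverse
    let buckets := seq.foldl pvScatter []
    buckets.foldl (fun out col => out ++ col) []

-- ===== PRECONDITION & SPEC =====
def Spec_interleave_blocks_py (blocks : List (List Int)) (round_idx : Int) (interleave : Bool) (out : List Int) : Prop := out = interleave_blocks_py_alt blocks round_idx interleave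
instance (blocks : List (List Int)) (round_idx : Int) (interleave : Bool) (out : List Int) : Decidable (Spec_interleave_blocks_py blocks round_idx interleave out) := by unfold Spec_interleave_blocks_py; infer_instance

-- ===== CLAIM (what is proved, stated in full; the proofs are below) =====
def Claim_equal_interleave_blocks_py : Prop := ∀ (blocks : List (List Int)) (round_idx : Int) (interleave : Bool), Dom_interleave_blocks_py blocks round_idx interleave → Spec_interleave_blocks_py blocks round_idx interleave (interleave_blocks_py blocks round_idx interleave)

-- ===== LEMMAS AND PROOFS =====

-- column j of a block sequence, and the maximal block length
def pvCol (seq : List (List Int)) (j : Nat) : List Int := seq.filterMap (fun b => b[j]?)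
def pvMaxLen (seq : List (List Int)) : Nat := seq.foldl (fun m b => max m b.length) 0

theorem pvFold_max_comm (l : List (List Int)) : ∀ (a c : Nat),
    l.foldl (fun m b => max m b.length) (max a c) = max c (l.foldl (fun m b => max m b.length) a) := by
  induction l with
  | nil => intro a c; simp [Nat.max_comm]
  | cons b l ih =>
    intro a c
    simp only [List.foldl_cons]
    rw [show max (max a c) b.length = max (max a b.length) c by omega, ih]

theorem pvMaxLen_cons (b : List Int) (l : List (List Int)) :
    pvMaxLen (b :: l) = max b.length (pvMaxLen l) := by
  unfold pvMaxLen
  simp only [List.foldl_cons]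
  exact pvFold_max_comm l 0 b.length

theorem pvMaxLen_reverse (l : List (List Int)) : pvMaxLen l.reverse = pvMaxLen l := by
  induction l with
  | nil => rfl
  | cons b l ih =>
    rw [List.reverse_cons, pvMaxLen_cons]
    unfold pvMaxLen
    rw [List.foldl_append]
    simp only [List.foldl_cons, List.foldl_nil]
    unfold pvMaxLen at ih
    omega

theorem pvLen_le_maxLen (l : List (List Int)) : ∀ b ∈ l, b.length ≤ pvMaxLen l := by
  intro b hb
  exact (PySem.List.le_foldl_max_nat l List.length 0).2 b hb

theorem pvCol_eq_nil (l : List (List Int)) (j : Nat) (h : pvMaxLen l ≤ j) : pvCol l j = [] := by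
  unfold pvCol
  rw [List.filterMap_eq_nil_iff]
  intro b hb
  exact List.getElem?_eq_none (le_trans (pvLen_le_maxLen l b hb) h)

theorem pvCastFold (bs : List (List Int)) : ∀ (a : Nat),
    (bs.map (fun b => (b.length : Int))).foldl max (a : Int)
      = ((bs.foldl (fun m b => max m b.length) a : Nat) : Int) := by
  induction bs with
  | nil => intro a; simp
  | cons b bs ih =>
    intro a
    simp only [List.map_cons, List.foldl_cons]
    rw [← Nat.cast_max, ih]

-- A's maxlen is (pvMaxLen blocks : Int)
theorem pvMaxlen_int (blocks : List (List Int)) :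
    (PySem.List.max? (blocks.map (fun b => (b.length : Int))) (fun x => x)).getD 0
      = (pvMaxLen blocks : Int) := by
  cases blocks with
  | nil => simp [PySem.List.max?, pvMaxLen]
  | cons b bs =>
    rw [List.map_cons, PySem.List.max?_id_cons, Option.getD_some, pvCastFold bs b.length]
    unfold pvMaxLen
    simp only [List.foldl_cons, Nat.zero_max]

-- scatter of one block, characterised pointwise
theorem pvScatter_spec (f : Nat → List Int) (m : Nat) (hf : ∀ j, m ≤ j → f j = []) (blk : List Int) :
    pvScatter ((List.range m).map f) blk
      = (List.range (max m blk.length)).map (fun j => f j ++ (blk[j]?.toList)) := by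
  unfold pvScatter
  have hextlen : (((List.range m).map f) ++ List.replicate (blk.length - m) ([] : List Int)).length
      = max m blk.length := by simp; omega
  have hext : ∀ (j : Nat),
      (((List.range m).map f) ++ List.replicate (blk.length - m) ([] : List Int))[j]?
        = if j < max m blk.length then some (f j) else none := by
    intro j
    by_cases hjm : j < m
    · have hjM : j < max m blk.length := by omega
      rw [List.getElem?_append_left (by simp; omega)]
      simp [hjm, hjM]
    · by_cases hjM : j < max m blk.length
      · rw [List.getElem?_append_right (by simp; omega)]
        simp only [List.length_map, List.length_range]
        rw [List.getElem?_replicate]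
        rw [if_pos (by omega), if_pos hjM, hf j (by omega)]
      · rw [List.getElem?_eq_none (by rw [hextlen]; omega), if_neg hjM]
  simp only [List.length_map, List.length_range]
  apply List.ext_getElem?
  intro j
  have hziplen : (List.zipWith (fun col v => col ++ [v])
      (((List.range m).map f) ++ List.replicate (blk.length - m) ([] : List Int)) blk).length
      = blk.length := by
    rw [List.length_zipWith, hextlen]; omega
  by_cases hjL : j < blk.length
  · rw [List.getElem?_append_left (by rw [hziplen]; exact hjL)]
    rw [List.getElem?_zipWith, hext j]
    rw [if_pos (by omega)]
    rw [List.getElem?_eq_getElem hjL]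
    simp only [List.getElem?_map]
    rw [List.getElem?_range (show j < max m blk.length by omega)]
    simp [List.getElem?_eq_getElem hjL]
  · rw [List.getElem?_append_right (by rw [hziplen]; omega)]
    rw [hziplen, List.getElem?_drop]
    have : blk.length + (j - blk.length) = j := by omega
    rw [this, hext j]
    by_cases hjM : j < max m blk.length
    · rw [if_pos hjM]
      simp only [List.getElem?_map]
      rw [List.getElem?_range hjM]
      simp [List.getElem?_eq_none (show blk.length ≤ j by omega)]
    · rw [if_neg hjM]
      simp [List.getElem?_eq_none (show (List.range (max m blk.length)).length ≤ j by simp; omega)]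

-- the scatter fold builds exactly the columns
theorem pvScatter_fold (rest : List (List Int)) : ∀ (p : List (List Int)),
    rest.foldl pvScatter ((List.range (pvMaxLen p)).map (pvCol p))
      = (List.range (pvMaxLen (p ++ rest))).map (pvCol (p ++ rest)) := by
  induction rest with
  | nil => intro p; simp
  | cons blk rest ih =>
    intro p
    simp only [List.foldl_cons]
    rw [pvScatter_spec (pvCol p) (pvMaxLen p) (fun j hj => pvCol_eq_nil p j hj) blk]
    have hM : max (pvMaxLen p) blk.length = pvMaxLen (p ++ [blk]) := by
      unfold pvMaxLen
      rw [List.foldl_append]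
      simp [Nat.max_comm]
    have hC : (fun j => pvCol p j ++ (blk[j]?.toList)) = pvCol (p ++ [blk]) := by
      funext j
      unfold pvCol
      rw [List.filterMap_append]
      cases h : blk[j]? <;> simp [h]
    rw [hM, hC, ih (p ++ [blk])]
    simp

theorem pvB_true (seq : List (List Int)) :
    (seq.foldl pvScatter []).foldl (fun out col => out ++ col) []
      = (List.range (pvMaxLen seq)).flatMap (pvCol seq) := by
  have h0 := pvScatter_fold seq []
  simp only [pvMaxLen, List.foldl_nil, List.range_zero, List.map_nil, List.nil_append] at h0
  rw [show (seq.foldl pvScatter [] : List (List Int))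
      = (List.range (pvMaxLen seq)).map (pvCol seq) from h0]
  rw [PySem.List.foldl_append_eq_flatten]
  rw [List.nil_append, ← List.flatMap_def]

-- A's filtered column equals pvCol
theorem pvColFilter (seq : List (List Int)) (k : Nat) :
    (seq.filter (fun b => decide ((k : Int) < (b.length : Int)))).map
        (fun b => PySem.List.pyGetD b (k : Int) 0)
      = pvCol seq k := by
  induction seq with
  | nil => rfl
  | cons b t ih =>
    by_cases h : k < b.length
    · rw [List.filter_cons_of_pos (by simpa using h), List.map_cons, ih]
      unfold pvCol
      simp only [List.filterMap_cons, List.getElem?_eq_getElem h]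
      congr 1
      rw [PySem.List.pyGetD_natCast]
      exact List.getD_eq_getElem b 0 h
    · rw [List.filter_cons_of_neg (by simpa using h), ih]
      unfold pvCol
      simp only [List.filterMap_cons, List.getElem?_eq_none (show b.length ≤ k by omega)]

theorem pvA_true (blocks seq : List (List Int)) (order : List Int)
    (hmap : order.map (fun idx => PySem.List.pyGetD blocks idx ([] : List Int)) = seq) :
    (PySem.List.pyRange 0 ((pvMaxLen blocks : Nat) : Int) 1).foldl (fun S i =>
      order.foldl (fun S idx =>
        let blk := PySem.List.pyGetD blocks idx ([] : List Int)
        if i < (blk.length : Int) then S ++ [PySem.List.pyGetD blk i 0] else S) S) []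
      = (List.range (pvMaxLen blocks)).flatMap (pvCol seq) := by
  have hinner : (fun (S : List Int) (i : Int) =>
      order.foldl (fun S idx =>
        let blk := PySem.List.pyGetD blocks idx ([] : List Int)
        if i < (blk.length : Int) then S ++ [PySem.List.pyGetD blk i 0] else S) S)
      = fun S i => S ++ (seq.filter (fun b => decide (i < (b.length : Int)))).map
          (fun b => PySem.List.pyGetD b i 0) := by
    funext S i
    have h1 := (List.foldl_map (f := fun idx => PySem.List.pyGetD blocks idx ([] : List Int))
      (g := fun (S b : List Int) => if i < (b.length : Int) then S ++ [PySem.List.pyGetD b i 0] else S)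
      (l := order) (init := S)).symm
    rw [hmap] at h1
    exact h1.trans (PySem.List.foldl_append_ite (fun b => i < ((b.length : Int)))
      (fun b => PySem.List.pyGetD b i 0) (l := seq) (acc := S))
  rw [hinner, PySem.List.pyRange_zero_nat, List.foldl_map]
  have hbody : (fun (S : List Int) (k : Nat) =>
      S ++ (seq.filter (fun b => decide ((k : Int) < (b.length : Int)))).map
        (fun b => PySem.List.pyGetD b (k : Int) 0))
      = fun S k => S ++ pvCol seq k := by
    funext S k
    rw [pvColFilter]
  rw [hbody]
  rw [PySem.List.foldl_append_eq_flatMap (pvCol seq)]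
  rw [List.nil_append]

theorem pvMod2 (r : Int) : PySem.Int.mod r 2 = 0 ∨ PySem.Int.mod r 2 = 1 := by
  have h1 := PySem.Int.mod_nonneg r (b := 2) (by norm_num)
  have h2 := PySem.Int.mod_lt r (b := 2) (by norm_num)
  omega

-- ===== VERDICT (by name: the statement is the Claim_ definition above) =====
theorem interleave_blocks_py_spec : Claim_equal_interleave_blocks_py := by
  intro blocks round_idx interleave _
  unfold Spec_interleave_blocks_py interleave_blocks_py interleave_blocks_py_alt
  by_cases hI : interleave = false
  · rw [if_pos hI, if_pos hI]
  · rw [if_neg hI, if_neg hI]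
    rcases pvMod2 round_idx with hm | hm
    · rw [if_neg (by rw [hm]; norm_num), if_pos hm, pvMaxlen_int blocks]
      rw [pvA_true blocks blocks _ (PySem.List.map_pyGetD_pyRange_zero' blocks [])]
      rw [pvB_true blocks]
    · rw [if_pos (by rw [hm]), if_neg (by rw [hm]; norm_num), pvMaxlen_int blocks]
      rw [pvA_true blocks blocks.reverse _
        (by rw [List.map_reverse, PySem.List.map_pyGetD_pyRange_zero' blocks []])]
      rw [pvB_true blocks.reverse, pvMaxLen_reverse]
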